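-- pv_equiv track=rewrite | github.com/lbliii/bengal | bengal/rendering/parsers/patitas/parsing/inline/core.py | _find_code_span_close
-- ===== SOURCE A (Python) =====
-- def _find_code_span_close(text: str, start: int, backtick_count: int) -> int:
--     """Find closing backticks for code span."""
--     pos = start
--     text_len = len(text)
--     while True:
--         idx = text.find("`", pos)
--         if idx == -1:
--             return -1
--         # Count consecutive backticks
--         count = 0
--         check_pos = idx
--         while check_pos < text_len and text[check_pos] == "`":
--             count += 1
--             check_pos += 1
--         if count == backtick_count:
--             return idx
--         pos = check_pos
-- ===== SOURCE B (Python) =====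
-- def _find_code_span_close(text: str, start: int, backtick_count: int) -> int:
--     """Find the first maximal backtick run of exactly the requested length, scanning once."""
--     n = len(text)
--     run = 0
--     for j in range(start, n):
--         if text[j] == "`":
--             run += 1
--         elif run:
--             if run == backtick_count:
--                 return j - run
--             run = 0
--     if run and run == backtick_count:
--         return n - run
--     return -1
-- ===== Notes on version B (the rewrite author's own statement) =====
-- stated objective: simpler
-- what changed: A's outer while-True of find('`',pos) / inner counting-while / advance is replaced by a single left-to-right character pass carrying a run-length counter; Pre_ excludes negative start, which is outside this scan-position helper's natural domain and where A's str.find applies Python's negative-index wraparound.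
-- outside the precondition, e.g. on _find_code_span_close('a`b', -1, 1): A returns -1, B returns 1
import Mathlib
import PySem

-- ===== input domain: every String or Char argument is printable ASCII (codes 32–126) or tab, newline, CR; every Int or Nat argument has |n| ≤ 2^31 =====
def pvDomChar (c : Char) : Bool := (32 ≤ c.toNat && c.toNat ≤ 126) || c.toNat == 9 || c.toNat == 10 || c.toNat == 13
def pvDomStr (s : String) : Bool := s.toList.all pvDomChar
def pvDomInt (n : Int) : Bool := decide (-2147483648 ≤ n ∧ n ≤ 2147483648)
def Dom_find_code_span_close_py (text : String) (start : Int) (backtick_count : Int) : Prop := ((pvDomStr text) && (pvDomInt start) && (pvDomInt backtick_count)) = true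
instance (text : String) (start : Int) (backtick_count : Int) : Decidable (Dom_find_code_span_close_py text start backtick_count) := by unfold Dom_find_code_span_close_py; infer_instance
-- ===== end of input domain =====

-- B replaces A's find/count/advance outer-while with a single left-to-right
-- character pass carrying a run-length counter (objective: simpler; same linear cost).

-- ===== PORT A =====

-- inner while of A: count of consecutive backticks at the head of a suffix
def pvRun : List Char → Nat
  | [] => 0
  | c :: rest => if c = '`' then pvRun rest + 1 else 0

-- the `while True` loop of A (fuel makes the recursion structural; text.length+1
-- iterations always suffice, since pos strictly increases and is bounded by the length)
def pvALoopF (cs : List Char) (k : Int) : Nat → Int → Int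
  | 0, _ => -1
  | fuel+1, pos =>
    if PySem.Chars.findFrom cs ['`'] pos none = -1 then -1
    else if (pvRun (cs.drop (PySem.Chars.findFrom cs ['`'] pos none).toNat) : Int) = k then
      PySem.Chars.findFrom cs ['`'] pos none
    else
      pvALoopF cs k fuel (↑((PySem.Chars.findFrom cs ['`'] pos none).toNat
          + pvRun (cs.drop (PySem.Chars.findFrom cs ['`'] pos none).toNat)))

def find_code_span_close_py (text : String) (start : Int) (backtick_count : Int) : Int :=
  pvALoopF text.toList backtick_count (text.toList.length + 1) start

-- ===== PORT B =====

-- B's for-loop: j = current index, run = length of the backtick run ending just before j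
def pvBLoop (k : Int) (j run : Nat) : List Char → Int
  | [] => if 0 < run ∧ (run : Int) = k then (j : Int) - run else -1
  | c :: rest =>
    if c = '`' then pvBLoop k (j + 1) (run + 1) rest
    else if 0 < run ∧ (run : Int) = k then (j : Int) - run
    else pvBLoop k (j + 1) 0 rest

def find_code_span_close_py_alt (text : String) (start : Int) (backtick_count : Int) : Int :=
  let cs := text.toList
  pvBLoop backtick_count start.toNat 0 (cs.drop start.toNat)

-- ===== PRECONDITION & SPEC =====
-- Pre_ excludes negative start: this helper's natural domain is a scan position in the
-- text; on negative start A's str.find applies Python's negative-index wraparound.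
def Pre_find_code_span_close_py (text : String) (start : Int) (backtick_count : Int) : Prop :=
  0 ≤ start
instance (text : String) (start : Int) (backtick_count : Int) : Decidable (Pre_find_code_span_close_py text start backtick_count) := by unfold Pre_find_code_span_close_py; infer_instance
def pvWitness_find_code_span_close_py : String × Int × Int := ("a `x` b", 3, 1)

def Spec_find_code_span_close_py (text : String) (start : Int) (backtick_count : Int) (out : Int) : Prop := out = find_code_span_close_py_alt text start backtick_count
instance (text : String) (start : Int) (backtick_count : Int) (out : Int) : Decidable (Spec_find_code_span_close_py text start backtick_count out) := by unfold Spec_find_code_span_close_py; infer_instance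

-- ===== CLAIM (what is proved, stated in full; the proofs are below) =====
def Claim_equal_find_code_span_close_py : Prop := ∀ (text : String) (start : Int) (backtick_count : Int), Dom_find_code_span_close_py text start backtick_count → Pre_find_code_span_close_py text start backtick_count → Spec_find_code_span_close_py text start backtick_count (find_code_span_close_py text start backtick_count)

-- ===== LEMMAS AND PROOFS =====

-- clamp applied by Python's str.find to its start argument (helper for lemmas)
def pvClamp (pos : Int) (n : Nat) : Nat :=
  if 0 ≤ pos then pos.toNat else (pos + n).toNat

-- findFrom at an arbitrary Int start equals findFrom at the clamped Nat start
theorem pvFF_clamp (cs : List Char) (pos : Int) :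
    PySem.Chars.findFrom cs ['`'] pos none
      = PySem.Chars.findFrom cs ['`'] (↑(min (pvClamp pos cs.length) cs.length)) none := by
  by_cases h0 : 0 ≤ pos
  · by_cases hn : pos ≤ (cs.length : Int)
    · rw [show ((↑(min (pvClamp pos cs.length) cs.length) : Int)) = pos by
        simp [pvClamp, h0]; omega]
    · have hmin : min (pvClamp pos cs.length) cs.length = cs.length := by
        simp [pvClamp, h0]; omega
      rw [hmin]
      have hfind : PySem.Chars.find ([] : List Char) ['`'] = -1 := by decide
      simp only [PySem.Chars.findFrom]
      split_ifs <;> simp_all [List.drop_length] <;> omega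
  · by_cases hz : 0 ≤ pos + (cs.length : Int)
    · rw [show ((↑(min (pvClamp pos cs.length) cs.length) : Int)) = pos + cs.length by
        simp [pvClamp, h0]; omega]
      simp only [PySem.Chars.findFrom]
      split_ifs <;> try rfl
      all_goals omega
    · rw [show ((↑(min (pvClamp pos cs.length) cs.length) : Int)) = 0 by
        simp [pvClamp, h0]; omega]
      simp only [PySem.Chars.findFrom]
      split_ifs <;> try rfl
      all_goals omega

theorem pvRun_le (l : List Char) : pvRun l ≤ l.length := by
  induction l with
  | nil => simp [pvRun]
  | cons c rest ih => simp only [pvRun]; split <;> simp <;> omega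

theorem pvRun_take (l : List Char) : l.take (pvRun l) = List.replicate (pvRun l) '`' := by
  induction l with
  | nil => simp [pvRun]
  | cons c rest ih =>
    simp only [pvRun]; split
    · next hc => subst hc; simp [List.replicate_succ, ih]
    · simp

theorem pvRun_split (l : List Char) : l = List.replicate (pvRun l) '`' ++ l.drop (pvRun l) := by
  conv_lhs => rw [← List.take_append_drop (pvRun l) l]
  rw [pvRun_take]

theorem pvRun_max (l : List Char) (c : Char) (r : List Char)
    (h : l.drop (pvRun l) = c :: r) : c ≠ '`' := by
  induction l generalizing c r with
  | nil => simp [pvRun] at h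
  | cons d rest ih =>
    by_cases hd : d = '`'
    · subst hd; simp only [pvRun, if_pos rfl] at h
      simp only [if_true] at h
      exact ih c r h
    · simp only [pvRun, if_neg hd, List.drop_zero] at h
      rw [List.cons.injEq] at h
      exact h.1 ▸ hd

-- B's loop returns -1 on a backtick-free suffix with run 0
theorem pvBLoop_noBT (k : Int) (l : List Char) (j : Nat)
    (h : ∀ c ∈ l, c ≠ '`') : pvBLoop k j 0 l = -1 := by
  induction l generalizing j with
  | nil => simp [pvBLoop]
  | cons c rest ih =>
    have hc := h c (by simp)
    simp only [pvBLoop, if_neg hc]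
    simpa using ih (j + 1) (fun d hd => h d (by simp [hd]))

-- B's loop skips backtick-free chars with run 0
theorem pvBLoop_skip (k : Int) (l₁ l₂ : List Char) (j : Nat)
    (h : ∀ c ∈ l₁, c ≠ '`') :
    pvBLoop k j 0 (l₁ ++ l₂) = pvBLoop k (j + l₁.length) 0 l₂ := by
  induction l₁ generalizing j with
  | nil => simp
  | cons c rest ih =>
    have hc := h c (by simp)
    simp only [List.cons_append, pvBLoop, if_neg hc]
    rw [if_neg (by simp)]
    rw [ih (j + 1) (fun d hd => h d (by simp [hd]))]
    have harith : j + 1 + rest.length = j + (c :: rest).length := by simp; omega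
    rw [harith]

-- B's loop consumes a block of backticks by incrementing run
theorem pvBLoop_repl (k : Int) (cnt j run : Nat) (t : List Char) :
    pvBLoop k j run (List.replicate cnt '`' ++ t) = pvBLoop k (j + cnt) (run + cnt) t := by
  induction cnt generalizing j run with
  | zero => simp
  | succ m ih =>
    simp only [List.replicate_succ, List.cons_append, pvBLoop, if_pos rfl, if_true]
    rw [ih]
    have h1 : j + 1 + m = j + (m + 1) := by omega
    have h2 : run + 1 + m = run + (m + 1) := by omega
    rw [h1, h2]

-- main loop equivalence at a Nat position inside the text, induction on fuel
theorem pvMain (cs : List Char) (k : Int) (fuel : Nat) :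
    ∀ pos : Nat, pos ≤ cs.length → cs.length - pos < fuel →
      pvALoopF cs k fuel (↑pos) = pvBLoop k pos 0 (cs.drop pos) := by
  induction fuel with
  | zero => omega
  | succ fuel ih =>
    intro pos hpos hfuel
    rw [pvALoopF]
    by_cases hidx : PySem.Chars.findFrom cs ['`'] (↑pos) none = -1
    · rw [if_pos hidx]
      rw [PySem.Chars.findFrom_natCast_eq_neg_one_iff cs ['`'] pos hpos] at hidx
      rw [pvBLoop_noBT]
      intro ch hch hq
      exact hidx ((List.singleton_infix_iff '`' (cs.drop pos)).mpr (hq ▸ hch))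
    · rw [if_neg hidx]
      obtain ⟨hge, hpre, hmin⟩ := PySem.Chars.findFrom_natCast_spec cs ['`'] pos hpos hidx
      set idx := PySem.Chars.findFrom cs ['`'] (↑pos) none with hidxdef
      have hidx0 : 0 ≤ idx := le_trans (by exact_mod_cast Int.natCast_nonneg pos) hge
      set i := idx.toNat with hi
      have hposi : pos ≤ i := by omega
      have hidxi : idx = (i : Int) := by omega
      obtain ⟨t0, ht0⟩ := hpre
      have hin : i < cs.length := by
        have hne : cs.drop i ≠ [] := by rw [← ht0]; simp
        have := List.drop_eq_nil_iff.not.mp hne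
        omega
      set c := pvRun (cs.drop i) with hc
      have hc1 : 1 ≤ c := by rw [hc, ← ht0]; simp [pvRun]
      have hcle : c ≤ cs.length - i := by
        have := pvRun_le (cs.drop i)
        simp [List.length_drop] at this
        omega
      -- B side: skip the backtick-free middle part
      have hmid : ∀ ch ∈ (cs.drop pos).take (i - pos), ch ≠ '`' := by
        intro ch hch
        obtain ⟨m, hm, hget⟩ := List.mem_iff_getElem.mp hch
        have hmlt : m < i - pos := by
          have : ((cs.drop pos).take (i - pos)).length ≤ i - pos := by simp
          omega
        have hml2 : pos + m < cs.length := by omega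
        have hget2 : ch = cs[pos + m]'hml2 := by
          rw [← hget, List.getElem_take, List.getElem_drop]
        have hnp := hmin (pos + m) (by omega) (by omega)
        rw [List.drop_eq_getElem_cons hml2] at hnp
        intro hq
        exact hnp (by rw [hq] at hget2; rw [← hget2]; exact List.cons_prefix_cons.mpr ⟨rfl, by simp⟩)
      have hsplit : cs.drop pos = (cs.drop pos).take (i - pos) ++ cs.drop i := by
        conv_lhs => rw [← List.take_append_drop (i - pos) (cs.drop pos)]
        rw [List.drop_drop, show pos + (i - pos) = i from by omega]
      rw [hsplit, pvBLoop_skip k _ _ pos hmid]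
      have hlenmid : ((cs.drop pos).take (i - pos)).length = i - pos := by
        simp; omega
      rw [hlenmid, show pos + (i - pos) = i by omega]
      -- B side: consume the run of c backticks
      have hsplit2 : cs.drop i = List.replicate c '`' ++ cs.drop (i + c) := by
        conv_lhs => rw [pvRun_split (cs.drop i)]
        rw [← hc, List.drop_drop, show i + c = c + i from by omega]
      rw [hsplit2, pvBLoop_repl, show (0 + c) = c from by omega]
      by_cases hk : (c : Int) = k
      · rw [if_pos hk]
        cases hdt : cs.drop (i + c) with
        | nil => simp only [pvBLoop]; rw [if_pos ⟨by omega, hk⟩]; push_cast; omega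
        | cons d r =>
          have hd : d ≠ '`' := by
            apply pvRun_max (cs.drop i) d r
            show List.drop (pvRun (cs.drop i)) (cs.drop i) = d :: r
            rw [← hc, List.drop_drop]
            exact hdt
          simp only [pvBLoop]; rw [if_neg hd, if_pos ⟨by omega, hk⟩]
          push_cast; omega
      · rw [if_neg hk]
        cases hdt : cs.drop (i + c) with
        | nil =>
          have hnc : cs.length ≤ i + c := List.drop_eq_nil_iff.mp hdt
          have hfz : PySem.Chars.findFrom cs ['`'] (↑(i + c)) none = -1 := by
            rw [show ((↑(i + c) : Int)) = ((cs.length : Nat) : Int) by omega]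
            rw [PySem.Chars.findFrom_natCast_eq_neg_one_iff cs ['`'] cs.length le_rfl]
            simp
          cases fuel with
          | zero => simp only [pvALoopF, pvBLoop]; rw [if_neg (by rintro ⟨-, hq⟩; exact hk hq)]
          | succ f =>
            rw [pvALoopF, if_pos hfz]
            simp only [pvBLoop]; rw [if_neg (by rintro ⟨-, hq⟩; exact hk hq)]
        | cons d r =>
          have hd : d ≠ '`' := by
            apply pvRun_max (cs.drop i) d r
            show List.drop (pvRun (cs.drop i)) (cs.drop i) = d :: r
            rw [← hc, List.drop_drop]
            exact hdt
          have hic : i + c < cs.length := by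
            have : cs.drop (i + c) ≠ [] := by rw [hdt]; simp
            have := List.drop_eq_nil_iff.not.mp this
            omega
          rw [ih (i + c) (by omega) (by omega), hdt]
          simp only [pvBLoop, if_neg hd]
          rw [if_neg (by rintro ⟨h0, -⟩; omega), if_neg (by rintro ⟨-, hq⟩; exact hk hq)]

-- ===== VERDICT (by name: the statement is the Claim_ definition above) =====
theorem find_code_span_close_py_spec : Claim_equal_find_code_span_close_py := by
  intro text start k _ hpre
  unfold Spec_find_code_span_close_py
  unfold find_code_span_close_py find_code_span_close_py_alt
  simp only []
  set cs := text.toList with hcs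
  have h0 : 0 ≤ start := hpre
  have hclamp : pvClamp start cs.length = start.toNat := by simp [pvClamp, h0]
  have hff : PySem.Chars.findFrom cs ['`'] start none
      = PySem.Chars.findFrom cs ['`'] (↑(min start.toNat cs.length)) none := by
    rw [pvFF_clamp cs start, hclamp]
  have h1 : pvALoopF cs k (cs.length + 1) start
      = pvALoopF cs k (cs.length + 1) (↑(min start.toNat cs.length)) := by
    simp only [pvALoopF]
    rw [hff]
  rcases le_or_gt start.toNat cs.length with hle | hgt
  · rw [h1, min_eq_left hle, pvMain cs k (cs.length + 1) _ hle (by omega)]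
  · rw [h1, min_eq_right (by omega), pvMain cs k (cs.length + 1) _ le_rfl (by omega)]
    rw [List.drop_length, List.drop_eq_nil_iff.mpr (by omega)]
    simp [pvBLoop]
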